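-- pv_equiv track=rewrite | github.com/morganda/advent2022 | d3/main.py | getCommonChar
-- ===== SOURCE A (Python) =====
-- def getCommonChar(lists):
--     lookups = list()
--     for s in range(len(lists) - 1):
--         lookup = dict()
--         for c in lists[s]:
--             lookup[c] = 1
--         lookups.append(lookup)
--     seek = lists[-1]
--     for s in seek:
--         match = True
--         for lookup in lookups:
--             if s not in lookup:
--                 match = False
--                 break
--         if match:
--             return s
--     return None
-- ===== SOURCE B (Python) =====
-- def getCommonChar(lists):
--     seek = lists[-1]
--     others = lists[:-1]
--     if not others:
--         return seek[0] if seek else None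
--     common = set(others[0])
--     for l in others[1:]:
--         common &= set(l)
--     for c in seek:
--         if c in common:
--             return c
--     return None
-- ===== Notes on version B (the rewrite author's own statement) =====
-- stated objective: simpler
-- what changed: B replaces the list of per-string membership dicts plus a nested all-lookups scan per character with one set intersection computed once over the other lists, then a single membership test per character of the last list.
import Mathlib
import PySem

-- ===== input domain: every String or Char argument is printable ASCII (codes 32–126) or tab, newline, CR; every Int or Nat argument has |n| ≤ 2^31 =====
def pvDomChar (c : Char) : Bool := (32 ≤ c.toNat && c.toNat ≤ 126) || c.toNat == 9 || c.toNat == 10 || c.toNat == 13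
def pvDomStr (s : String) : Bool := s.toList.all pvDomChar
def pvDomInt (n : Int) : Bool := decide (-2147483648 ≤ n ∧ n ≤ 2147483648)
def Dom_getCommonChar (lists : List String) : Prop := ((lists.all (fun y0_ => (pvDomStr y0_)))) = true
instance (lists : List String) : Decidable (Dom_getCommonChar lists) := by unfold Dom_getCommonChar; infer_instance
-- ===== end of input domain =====

-- B replaces A's per-string membership dicts and nested per-character scan over all dicts
-- by one set intersection built once, then a single membership test per character (objective: simpler).

-- ===== PORT A =====
-- inner loop 'for lookup in lookups: if s not in lookup: match = False; break'
def pvChkA (c : Char) : List (PySem.Dict Char Int) → Bool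
  | [] => true
  | l :: ls => if !(l.contains c) then false else pvChkA c ls

-- outer loop 'for s in seek: … if match: return s'
def pvScanA (lookups : List (PySem.Dict Char Int)) : List Char → Option String
  | [] => none
  | c :: cs => if pvChkA c lookups then some (String.ofList [c]) else pvScanA lookups cs

def getCommonChar (lists : List String) : Option String :=
  let lookups := (PySem.List.pyRange 0 ((lists.length : Int) - 1) 1).foldl
    (fun acc s =>
      let lookup := (PySem.List.pyGetD lists s "").toList.foldl
        (fun d c => d.insert c (1 : Int)) PySem.Dict.empty
      acc ++ [lookup]) []
  -- seek = lists[-1] raises IndexError on []: excluded by Pre_, getD is never taken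
  let seek := (PySem.List.pyGet? lists (-1)).getD ""
  pvScanA lookups seek.toList

-- ===== PORT B =====
-- 'for c in seek: if c in common: return c'
def pvFindB (common : PySem.Set Char) : List Char → Option String
  | [] => none
  | c :: cs => if PySem.Set.contains common c then some (String.ofList [c]) else pvFindB common cs

def getCommonChar_alt (lists : List String) : Option String :=
  -- seek = lists[-1] raises IndexError on []: excluded by Pre_, getD is never taken
  let seek := (PySem.List.pyGet? lists (-1)).getD ""
  let others := PySem.List.slice lists none (some (-1))
  match others with
  | [] => match seek.toList with
          | [] => none
          | c :: _ => some (String.ofList [c])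
  | o :: os =>
    let common := os.foldl (fun acc l => PySem.Set.inter acc (PySem.Set.ofList l.toList))
      (PySem.Set.ofList o.toList)
    pvFindB common seek.toList

-- ===== PRECONDITION & SPEC =====
-- Pre_ excludes only the empty list, on which A raises IndexError at lists[-1].
def Pre_getCommonChar (lists : List String) : Prop := lists ≠ []
instance (lists : List String) : Decidable (Pre_getCommonChar lists) := by unfold Pre_getCommonChar; infer_instance
def pvWitness_getCommonChar : List String := ["ab", "bc"]

def Spec_getCommonChar (lists : List String) (out : Option String) : Prop := out = getCommonChar_alt lists
instance (lists : List String) (out : Option String) : Decidable (Spec_getCommonChar lists out) := by unfold Spec_getCommonChar; infer_instance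

-- ===== CLAIM (what is proved, stated in full; the proofs are below) =====
def Claim_equal_getCommonChar : Prop := ∀ (lists : List String), Dom_getCommonChar lists → Pre_getCommonChar lists → Spec_getCommonChar lists (getCommonChar lists)

-- ===== LEMMAS AND PROOFS =====

-- A's per-string dict contains c iff c is a character of the string
def pvDictOf (s : String) : PySem.Dict Char Int :=
  s.toList.foldl (fun d c => d.insert c (1 : Int)) PySem.Dict.empty

theorem pvDictOf_contains_aux (x : Char) (l : List Char) (d : PySem.Dict Char Int) :
    (l.foldl (fun d c => d.insert c (1 : Int)) d).contains x = (decide (x ∈ l) || d.contains x) := by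
  induction l generalizing d with
  | nil => simp
  | cons c cs ih =>
    simp only [List.foldl_cons, ih, PySem.Dict.contains_insert, List.mem_cons]
    by_cases h : x = c
    · simp [h]
    · simp [h, beq_eq_false_iff_ne.mpr h]

theorem pvDictOf_contains (x : Char) (s : String) :
    (pvDictOf s).contains x = decide (x ∈ s.toList) := by
  simp [pvDictOf, pvDictOf_contains_aux]

-- A's inner loop over the dicts is an all-quantifier
theorem pvChkA_eq_all (c : Char) (ls : List (PySem.Dict Char Int)) :
    pvChkA c ls = ls.all (fun l => l.contains c) := by
  induction ls with
  | nil => rfl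
  | cons l ls ih => cases h : l.contains c <;> simp [pvChkA, h, ih]

-- B's intersection fold: membership = membership in every intersected list
theorem pvCommon_contains (x : Char) (os : List String) (acc : PySem.Set Char) :
    PySem.Set.contains (os.foldl (fun acc l => PySem.Set.inter acc (PySem.Set.ofList l.toList)) acc) x
      = (acc.contains x && os.all (fun l => decide (x ∈ l.toList))) := by
  induction os generalizing acc with
  | nil => simp
  | cons o os ih =>
    simp only [List.foldl_cons, ih, List.all_cons]
    by_cases h : x ∈ acc
    · simp [PySem.Set.mem_inter, PySem.Set.mem_ofList, h]
    · simp [PySem.Set.mem_inter, PySem.Set.mem_ofList, h]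

-- A's lookups list is the map of pvDictOf over lists.dropLast
theorem pvLookups_eq (lists : List String) :
    (PySem.List.pyRange 0 ((lists.length : Int) - 1) 1).foldl
      (fun acc s => acc ++ [(PySem.List.pyGetD lists s "").toList.foldl
        (fun d c => d.insert c (1 : Int)) PySem.Dict.empty]) []
    = lists.dropLast.map pvDictOf := by
  cases lists with
  | nil => simp [PySem.List.pyRange_one_eq_nil]
  | cons a as =>
    have hlen2 : ((a :: as).length : Int) - 1 = ((a :: as).dropLast.length : Int) := by
      simp [List.length_dropLast]
    rw [hlen2]
    have hcongr : ∀ (acc : List (PySem.Dict Char Int)) (s : Int),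
        s ∈ PySem.List.pyRange 0 ((a :: as).dropLast.length : Int) 1 →
        acc ++ [(PySem.List.pyGetD (a :: as) s "").toList.foldl
          (fun d c => d.insert c (1 : Int)) PySem.Dict.empty]
        = acc ++ [(PySem.List.pyGetD (a :: as).dropLast s "").toList.foldl
          (fun d c => d.insert c (1 : Int)) PySem.Dict.empty] := by
      intro acc s hs
      rw [PySem.List.mem_pyRange_one] at hs
      obtain ⟨h0, h1⟩ := hs
      obtain ⟨n, rfl⟩ := Int.eq_ofNat_of_zero_le h0
      have hn : n < (a :: as).dropLast.length := by exact_mod_cast h1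
      rw [PySem.List.pyGetD_natCast, PySem.List.pyGetD_natCast]
      have : (a :: as).dropLast.getD n "" = (a :: as).getD n "" := by
        simp only [List.getD_eq_getElem?_getD, List.getElem?_dropLast]
        rw [if_pos (by simpa using hn)]
      rw [this]
    rw [PySem.List.foldl_congr_mem _ _ _ _ (fun acc s hs => hcongr acc s hs)]
    have hl : (((a :: as).dropLast.length : Int)) = PySem.List.len (a :: as).dropLast := rfl
    rw [hl, PySem.List.foldl_pyRange_zero_pyGetD
      (f := fun (acc : List (PySem.Dict Char Int)) (v : String) => acc ++ [v.toList.foldl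
        (fun d c => d.insert c (1 : Int)) PySem.Dict.empty])]
    rw [PySem.List.foldl_append_singleton_eq_map]
    rfl

-- the two scans agree when the membership predicates agree on every character
theorem pvScan_eq_find (lookups : List (PySem.Dict Char Int)) (common : PySem.Set Char)
    (cs : List Char) (h : ∀ c, pvChkA c lookups = PySem.Set.contains common c) :
    pvScanA lookups cs = pvFindB common cs := by
  induction cs with
  | nil => rfl
  | cons c cs ih => simp [pvScanA, pvFindB, h, ih]

-- with no other lists A accepts every character of seek
theorem pvScanA_nil (cs : List Char) :
    pvScanA [] cs = match cs with | [] => none | c :: _ => some (String.ofList [c]) := by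
  cases cs <;> simp [pvScanA, pvChkA]

-- ===== VERDICT (by name: the statement is the Claim_ definition above) =====
theorem getCommonChar_spec : Claim_equal_getCommonChar := by
  intro lists _ hpre
  unfold Spec_getCommonChar getCommonChar getCommonChar_alt
  rw [pvLookups_eq, PySem.List.slice_to_neg_one]
  cases hdl : lists.dropLast with
  | nil =>
    simp only [List.map_nil]
    rw [pvScanA_nil]
  | cons o os =>
    simp only [List.map_cons]
    apply pvScan_eq_find
    intro c
    rw [pvChkA_eq_all, pvCommon_contains]
    simp [Function.comp_def, pvDictOf_contains]
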